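-- pv_equiv track=rewrite | github.com/laclustr/CSP | Problem Sets/CSP-Pset3/grant_vance_pset3.py | filter_sunset
-- ===== SOURCE A (Python) =====
-- def limit_255_rgb(image):
-- 	lim_img = []
-- 	for row in image:
-- 		new_row = []
-- 		for px_rgb in row:
-- 			new_px = []
-- 			for px in px_rgb:
-- 				px = px // 1
-- 				if px >= 255:
-- 					new_px += [255]
-- 				elif px <= 0:
-- 					new_px += [0]
-- 				else:
-- 					new_px += [px]
-- 			new_row.append(new_px)
-- 		lim_img.append(new_row)
-- 	return lim_img
--
-- def filter_sunset(image, adjustment):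
-- 	new_img = []
-- 	for row in range(len(image)):
-- 		new_row = []
-- 		for px_rgb in range(len(image[row])):
-- 			new_px = []
-- 			for i in range(len(image[row][px_rgb])):
-- 				if not i:
-- 					new_px += [image[row][px_rgb][i] + adjustment]
-- 				else:
-- 					new_px += [image[row][px_rgb][i]]
-- 			new_row += [new_px]
-- 		new_img += [new_row]
-- 	return limit_255_rgb(new_img)
-- ===== SOURCE B (Python) =====
-- def filter_sunset(image, adjustment):
--     def clamp(v):
--         return 255 if v >= 255 else 0 if v <= 0 else v
--     return [[[clamp(v + (adjustment if i == 0 else 0)) for i, v in enumerate(px)]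
--              for px in row]
--             for row in image]
-- ===== Notes on version B (the rewrite author's own statement) =====
-- stated objective: simpler
-- what changed: Fused A's two passes (index-driven adjustment pass building an intermediate image, then a separate limit_255_rgb clamping pass) into a single nested comprehension that adjusts index 0 and clamps each channel inline, avoiding the intermediate image.
import Mathlib
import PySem

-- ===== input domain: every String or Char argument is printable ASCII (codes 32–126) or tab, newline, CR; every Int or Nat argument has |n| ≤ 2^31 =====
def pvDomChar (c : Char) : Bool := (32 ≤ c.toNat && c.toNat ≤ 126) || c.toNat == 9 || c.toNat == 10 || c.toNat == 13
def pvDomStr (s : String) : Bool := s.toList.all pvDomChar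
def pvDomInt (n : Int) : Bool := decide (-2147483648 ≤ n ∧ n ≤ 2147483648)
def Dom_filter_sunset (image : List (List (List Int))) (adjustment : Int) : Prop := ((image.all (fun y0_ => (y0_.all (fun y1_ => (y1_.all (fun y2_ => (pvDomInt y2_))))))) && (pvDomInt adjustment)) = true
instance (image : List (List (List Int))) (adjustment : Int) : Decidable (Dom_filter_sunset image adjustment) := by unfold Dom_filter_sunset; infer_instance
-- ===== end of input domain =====

-- B fuses A's two passes (adjust red via index loops + separate limit_255_rgb clamp pass over an
-- intermediate image) into one nested comprehension that adjusts index 0 and clamps inline (simpler).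


-- ===== PORT A =====
-- helper limit_255_rgb, transliterated: three nested append-accumulating loops
def limit_255_rgb (image : List (List (List Int))) : List (List (List Int)) :=
  image.foldl (fun lim_img row =>
    lim_img ++ [row.foldl (fun new_row px_rgb =>
      new_row ++ [px_rgb.foldl (fun new_px px0 =>
        let px := PySem.Int.floordiv px0 1
        if px ≥ 255 then new_px ++ [255]
        else if px ≤ 0 then new_px ++ [0]
        else new_px ++ [px]) []]) []]) []

def filter_sunset (image : List (List (List Int))) (adjustment : Int) : List (List (List Int)) :=
  limit_255_rgb
    ((PySem.List.pyRange 0 image.length 1).foldl (fun new_img row =>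
      new_img ++ [(PySem.List.pyRange 0 (PySem.List.pyGetD image row []).length 1).foldl (fun new_row px_rgb =>
        new_row ++ [(PySem.List.pyRange 0 (PySem.List.pyGetD (PySem.List.pyGetD image row []) px_rgb []).length 1).foldl (fun new_px i =>
          if i == 0 then new_px ++ [PySem.List.pyGetD (PySem.List.pyGetD (PySem.List.pyGetD image row []) px_rgb []) i 0 + adjustment]
          else new_px ++ [PySem.List.pyGetD (PySem.List.pyGetD (PySem.List.pyGetD image row []) px_rgb []) i 0]) []]) []]) [])

-- ===== PORT B =====
def pvClamp (v : Int) : Int := if v ≥ 255 then 255 else if v ≤ 0 then 0 else v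

def filter_sunset_alt (image : List (List (List Int))) (adjustment : Int) : List (List (List Int)) :=
  image.map (fun row => row.map (fun px =>
    (PySem.List.enumerate px 0).map (fun iv =>
      pvClamp (iv.2 + (if iv.1 == 0 then adjustment else 0)))))

-- ===== PRECONDITION & SPEC =====
def Spec_filter_sunset (image : List (List (List Int))) (adjustment : Int) (out : List (List (List Int))) : Prop := out = filter_sunset_alt image adjustment
instance (image : List (List (List Int))) (adjustment : Int) (out : List (List (List Int))) : Decidable (Spec_filter_sunset image adjustment out) := by unfold Spec_filter_sunset; infer_instance

-- ===== CLAIM (what is proved, stated in full; the proofs are below) =====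
def Claim_equal_filter_sunset : Prop := ∀ (image : List (List (List Int))) (adjustment : Int), Dom_filter_sunset image adjustment → Spec_filter_sunset image adjustment (filter_sunset image adjustment)

-- ===== LEMMAS AND PROOFS =====

theorem pv_foldl_snoc {α β : Type} (f : α → β) (xs : List α) (init : List β) :
    xs.foldl (fun acc x => acc ++ [f x]) init = init ++ xs.map f := by
  induction xs generalizing init with
  | nil => simp
  | cons x t ih => simp [List.foldl, ih]

theorem pv_floordiv_one (v : Int) : PySem.Int.floordiv v 1 = v := by
  simp [PySem.Int.floordiv]

theorem pv_clamp_fold (xs : List Int) (init : List Int) :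
    xs.foldl (fun new_px px0 =>
        let px := PySem.Int.floordiv px0 1
        if px ≥ 255 then new_px ++ [255]
        else if px ≤ 0 then new_px ++ [0]
        else new_px ++ [px]) init = init ++ xs.map pvClamp := by
  induction xs generalizing init with
  | nil => simp
  | cons x t ih =>
      simp only [List.foldl, ih]
      simp only [pv_floordiv_one]
      have hc : pvClamp x = if x ≥ 255 then 255 else if x ≤ 0 then (0:Int) else x := rfl
      simp only [List.map_cons]
      rw [hc]; split_ifs <;> simp

theorem pv_limit_eq_map (image : List (List (List Int))) :
    limit_255_rgb image = image.map (fun row => row.map (fun px => px.map pvClamp)) := by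
  unfold limit_255_rgb
  have h1 : ∀ px_rgb : List Int, px_rgb.foldl (fun new_px px0 =>
        let px := PySem.Int.floordiv px0 1
        if px ≥ 255 then new_px ++ [255]
        else if px ≤ 0 then new_px ++ [0]
        else new_px ++ [px]) [] = px_rgb.map pvClamp := by
    intro px_rgb; simpa using pv_clamp_fold px_rgb []
  simp only [h1, pv_foldl_snoc, List.nil_append]

def pvAdj (adjustment : Int) : List Int → List Int
  | [] => []
  | h :: t => (h + adjustment) :: t

theorem pv_index_fold {alpha beta : Type} (xs : List alpha) (d : alpha) (g : alpha → beta) :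
    (PySem.List.pyRange 0 (xs.length : Int) 1).foldl
      (fun acc j => acc ++ [g (PySem.List.pyGetD xs j d)]) [] = xs.map g := by
  refine (PySem.List.foldl_pyRange_zero_pyGetD' (xs := xs) (d := d)
    (f := fun acc x => acc ++ [g x]) (init := [])).trans ?_
  simpa using pv_foldl_snoc g xs []

-- the inner index loop of A builds the adjusted pixel: head + adjustment, tail unchanged
theorem pv_adjust_fold (pxL : List Int) (adjustment : Int) :
    (PySem.List.pyRange 0 pxL.length 1).foldl (fun new_px i =>
        if i == 0 then new_px ++ [PySem.List.pyGetD pxL i 0 + adjustment]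
        else new_px ++ [PySem.List.pyGetD pxL i 0]) [] = pvAdj adjustment pxL := by
  cases pxL with
  | nil => simp [PySem.List.pyRange_one_eq_nil, pvAdj]
  | cons h t =>
      have hlen : (0:Int) < ((h :: t).length : Int) := by exact_mod_cast Nat.succ_pos t.length
      rw [PySem.List.pyRange_one_cons hlen]
      simp only [List.foldl, beq_self_eq_true, if_true, List.nil_append, zero_add]
      have h0 : PySem.List.pyGetD (h :: t) 0 0 = h := by
        simp [PySem.List.pyGetD, PySem.List.pyIdx?, PySem.List.pyGet?]
      rw [h0]
      have hcongr : (PySem.List.pyRange 1 ((h :: t).length : Int) 1).foldl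
          (fun new_px i =>
            if i == 0 then new_px ++ [PySem.List.pyGetD (h :: t) i 0 + adjustment]
            else new_px ++ [PySem.List.pyGetD (h :: t) i 0]) [h + adjustment]
        = (PySem.List.pyRange 1 ((h :: t).length : Int) 1).foldl
          (fun acc i => acc ++ [PySem.List.pyGetD (h :: t) i 0]) [h + adjustment] := by
        refine PySem.List.foldl_congr_mem _ _ _ _ ?_
        intro acc x hx
        rw [PySem.List.mem_pyRange_one] at hx
        have hne : (x == 0) = false := by simp only [beq_eq_false_iff_ne]; omega
        simp [hne]
      rw [hcongr, PySem.List.foldl_pyRange_pyGetD' (f := fun acc v => acc ++ [v])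
            (xs := h :: t) (d := 0) (init := [h + adjustment]) (a := 1) (by omega)]
      simp [pv_foldl_snoc (fun v => v), pvAdj]

-- indices ≥ 1 never hit the i == 0 branch of B's per-channel function
theorem pv_enum_tail (adjustment : Int) (t : List Int) (s : Int) (hs : 1 ≤ s) :
    (PySem.List.enumerate t s).map
      (fun iv => pvClamp (iv.2 + (if iv.1 == 0 then adjustment else 0))) = t.map pvClamp := by
  induction t generalizing s with
  | nil => simp [PySem.List.enumerate_nil]
  | cons x t ih =>
      rw [PySem.List.enumerate_cons]
      simp only [List.map_cons]
      have hne : (s == 0) = false := by simp only [beq_eq_false_iff_ne]; omega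
      rw [ih (s + 1) (by omega)]
      simp [hne]

theorem pv_px_eq (adjustment : Int) (pxL : List Int) :
    (pvAdj adjustment pxL).map pvClamp
  = (PySem.List.enumerate pxL 0).map
      (fun iv => pvClamp (iv.2 + (if iv.1 == 0 then adjustment else 0))) := by
  cases pxL with
  | nil => simp [pvAdj, PySem.List.enumerate_nil]
  | cons h t =>
      rw [PySem.List.enumerate_cons]
      simp only [pvAdj, List.map_cons, beq_self_eq_true, if_true, zero_add]
      rw [pv_enum_tail adjustment t 1 (by omega)]

theorem filter_sunset_eq (image : List (List (List Int))) (adjustment : Int) :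
    filter_sunset image adjustment = filter_sunset_alt image adjustment := by
  unfold filter_sunset filter_sunset_alt
  have houter : (PySem.List.pyRange 0 image.length 1).foldl (fun new_img row =>
      new_img ++ [(PySem.List.pyRange 0 (PySem.List.pyGetD image row []).length 1).foldl (fun new_row px_rgb =>
        new_row ++ [(PySem.List.pyRange 0 (PySem.List.pyGetD (PySem.List.pyGetD image row []) px_rgb []).length 1).foldl (fun new_px i =>
          if i == 0 then new_px ++ [PySem.List.pyGetD (PySem.List.pyGetD (PySem.List.pyGetD image row []) px_rgb []) i 0 + adjustment]
          else new_px ++ [PySem.List.pyGetD (PySem.List.pyGetD (PySem.List.pyGetD image row []) px_rgb []) i 0]) []]) []]) []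
      = image.map (fun rowL => rowL.map (pvAdj adjustment)) := by
    refine (pv_index_fold image ([] : List (List Int)) (fun rowL =>
      (PySem.List.pyRange 0 (rowL.length : Int) 1).foldl (fun new_row px_rgb =>
        new_row ++ [(PySem.List.pyRange 0 ((PySem.List.pyGetD rowL px_rgb []).length : Int) 1).foldl (fun new_px i =>
          if i == 0 then new_px ++ [PySem.List.pyGetD (PySem.List.pyGetD rowL px_rgb []) i 0 + adjustment]
          else new_px ++ [PySem.List.pyGetD (PySem.List.pyGetD rowL px_rgb []) i 0]) []]) [])).trans ?_
    refine List.map_congr_left ?_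
    intro rowL _
    refine (pv_index_fold rowL ([] : List Int) (fun pxL =>
      (PySem.List.pyRange 0 (pxL.length : Int) 1).foldl (fun new_px i =>
        if i == 0 then new_px ++ [PySem.List.pyGetD pxL i 0 + adjustment]
        else new_px ++ [PySem.List.pyGetD pxL i 0]) [])).trans ?_
    refine List.map_congr_left ?_
    intro pxL _
    exact pv_adjust_fold pxL adjustment
  rw [houter, pv_limit_eq_map]
  simp only [List.map_map]
  refine List.map_congr_left ?_
  intro rowL _
  simp only [Function.comp_apply, List.map_map]
  refine List.map_congr_left ?_
  intro pxL _
  simp only [Function.comp_apply]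
  exact pv_px_eq adjustment pxL

-- ===== VERDICT (by name: the statement is the Claim_ definition above) =====
theorem filter_sunset_spec : Claim_equal_filter_sunset := by
  intro image adjustment _
  unfold Spec_filter_sunset
  exact filter_sunset_eq image adjustment
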